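-- pv_equiv track=rewrite | github.com/puzzler10/constraint_enforcing_reward | src/insights.py | _get_subsequences
-- ===== SOURCE A (Python) =====
-- import functools, operator, string
-- from itertools import groupby
--
-- def _join_punctuation(seq, characters=set(string.punctuation)):
--     "Generator to join tokens respecting punctuation, but doesn't work that well."
--     seq = iter(seq)
--     current = next(seq)
--     for nxt in seq:
--         if nxt in characters:
--             current += nxt
--         else:
--             yield current
--             current = nxt
--     yield current
--
-- def _get_subsequences(diff, sign):
--     op = {"insertions": "+", "removals": "-", "unchanged": " "}[sign]
--     idx,tokens = [],[]
--     for i, o in enumerate(diff):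
--         if o[0] == op:  idx.append(i); tokens.append(o[2:])
--     ## Group tokens that go together
--     token_groups = []
--     # bit of a mystery this bit but seems to work. just need 1-1 mapping between data and tokens
--     for k, g in groupby(zip(enumerate(idx), tokens), lambda ix: ix[0][0] - ix[0][1]):
--         token_groups.append(list(map(operator.itemgetter(1), g)))
--     phrases = [' '.join(_join_punctuation(l)) for l in token_groups]
--     return idx, tokens, token_groups, phrases
-- ===== SOURCE B (Python) =====
-- import string
--
-- _PUNCT = set(string.punctuation)
--
--
-- def _get_subsequences(diff, sign):
--     op = {"insertions": "+", "removals": "-", "unchanged": " "}[sign]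
--     idx, tokens, token_groups, phrases = [], [], [], []
--     prev_i = None
--     merged = None  # current group's tokens with punctuation already glued on
--     for i, o in enumerate(diff):
--         if o[0] != op:
--             continue
--         tok = o[2:]
--         idx.append(i)
--         tokens.append(tok)
--         if prev_i is not None and i == prev_i + 1:
--             token_groups[-1].append(tok)
--             if tok in _PUNCT:
--                 merged[-1] += tok
--             else:
--                 merged.append(tok)
--         else:
--             if merged is not None:
--                 phrases.append(' '.join(merged))
--             token_groups.append([tok])
--             merged = [tok]
--         prev_i = i
--     if merged is not None:
--         phrases.append(' '.join(merged))
--     return idx, tokens, token_groups, phrases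
-- ===== Notes on version B (the rewrite author's own statement) =====
-- stated objective: simpler
-- what changed: Replaces A's three-phase pipeline (filter loop, then itertools.groupby on the arithmetic key pos-idx over zip(enumerate(idx),tokens), then a _join_punctuation generator per group) with one forward pass over enumerate(diff) that starts/extends the current group by comparing each matched diff index with the previous one and glues punctuation tokens onto the previous token inline.
import Mathlib
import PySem

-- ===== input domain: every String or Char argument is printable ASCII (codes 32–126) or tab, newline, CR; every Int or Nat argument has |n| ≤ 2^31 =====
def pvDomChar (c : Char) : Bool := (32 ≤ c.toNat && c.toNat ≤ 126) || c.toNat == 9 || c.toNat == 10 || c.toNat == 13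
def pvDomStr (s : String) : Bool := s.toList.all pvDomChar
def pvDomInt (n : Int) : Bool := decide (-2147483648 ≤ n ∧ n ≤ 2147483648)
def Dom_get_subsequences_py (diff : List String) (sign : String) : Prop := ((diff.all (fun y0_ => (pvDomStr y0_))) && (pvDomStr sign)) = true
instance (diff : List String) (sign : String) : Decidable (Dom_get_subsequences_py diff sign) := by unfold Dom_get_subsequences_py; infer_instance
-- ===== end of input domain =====

-- B replaces A's two-phase filter-then-groupby-then-join pipeline by one forward pass that
-- groups and glues punctuation inline (objective: simpler decomposition, same asymptotic cost).


-- ===== PORT A =====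
-- string.punctuation
def pvPunct : List Char := "!\"#$%&'()*+,-./:;<=>?@[\\]^_`{|}~".toList

-- 'tok in set(string.punctuation)': true iff tok is one punctuation character
def pvIsPunctTok (s : String) : Bool :=
  match s.toList with
  | [c] => pvPunct.contains c
  | _ => false

-- {"insertions": "+", "removals": "-", "unchanged": " "}[sign]; none = KeyError, excluded by Pre_
def pvOp? (sign : String) : Option Char :=
  if sign = "insertions" then some '+'
  else if sign = "removals" then some '-'
  else if sign = "unchanged" then some ' '
  else none

-- generator _join_punctuation, consumed into a list (called on nonempty groups only)
def pvJoinPunct : List String → List String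
  | [] => []
  | h :: t =>
    let p := t.foldl (fun (p : List String × String) nxt =>
      if pvIsPunctTok nxt then (p.1, p.2 ++ nxt) else (p.1 ++ [p.2], nxt)) ([], h)
    p.1 ++ [p.2]

-- the loop body over itertools.groupby(..., key = pos - idxval), collecting map(itemgetter(1), g)
def pvGbyStep (st : Option Int × List String × List (List String))
    (x : (Int × Int) × String) : Option Int × List String × List (List String) :=
  let k := x.1.1 - x.1.2
  match st with
  | (none, _, gs) => (some k, [x.2], gs)
  | (some k', g, gs) =>
    if k = k' then (some k', g ++ [x.2], gs) else (some k, [x.2], gs ++ [g])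

def pvGbyFin (st : Option Int × List String × List (List String)) : List (List String) :=
  match st with
  | (none, _, gs) => gs
  | (some _, g, gs) => gs ++ [g]

def pvGroupby (l : List ((Int × Int) × String)) : List (List String) :=
  pvGbyFin (l.foldl pvGbyStep (none, [], []))

def get_subsequences_py (diff : List String) (sign : String) :
    List Int × List String × List (List String) × List String :=
  match pvOp? sign with
  | none => ([], [], [], [])    -- Python raises KeyError here; excluded by Pre_
  | some op =>
    let it := (PySem.List.enumerate diff).foldl
      (fun (st : List Int × List String) p =>
        if PySem.Str.pyGet? p.2 0 = some op then
          (st.1 ++ [p.1], st.2 ++ [PySem.Str.slice p.2 (some 2) none])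
        else st) ([], [])
    let token_groups := pvGroupby ((PySem.List.enumerate it.1).zip it.2)
    (it.1, it.2, token_groups, token_groups.map (fun l => PySem.Str.join " " (pvJoinPunct l)))

-- ===== PORT B =====
-- token_groups[-1].append(tok)
def pvAppendLast (gs : List (List String)) (t : String) : List (List String) :=
  match gs with
  | [] => []
  | [g] => [g ++ [t]]
  | g :: rest => g :: pvAppendLast rest t

-- merged[-1] += tok
def pvGlueLast (m : List String) (t : String) : List String :=
  match m with
  | [] => []
  | [x] => [x ++ t]
  | x :: rest => x :: pvGlueLast rest t

-- loop body of Source B after the 'continue' guard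
def pvBodyB (st : List Int × List String × List (List String) × List String × Option Int × Option (List String))
    (p : Int × String) :
    List Int × List String × List (List String) × List String × Option Int × Option (List String) :=
  let tok := PySem.Str.slice p.2 (some 2) none
  let (idx, tokens, groups, phrases, prevI, merged) := st
  let idx := idx ++ [p.1]
  let tokens := tokens ++ [tok]
  match prevI, merged with
  | some j, some m =>
    if p.1 = j + 1 then
      (idx, tokens, pvAppendLast groups tok, phrases,
       some p.1, some (if pvIsPunctTok tok then pvGlueLast m tok else m ++ [tok]))
    else
      (idx, tokens, groups ++ [[tok]], phrases ++ [PySem.Str.join " " m], some p.1, some [tok])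
  | _, _ => (idx, tokens, groups ++ [[tok]], phrases, some p.1, some [tok])

def pvStepB (op : Char)
    (st : List Int × List String × List (List String) × List String × Option Int × Option (List String))
    (p : Int × String) :
    List Int × List String × List (List String) × List String × Option Int × Option (List String) :=
  if PySem.Str.pyGet? p.2 0 ≠ some op then st else pvBodyB st p

-- the final flush after the loop
def pvBFin (st : List Int × List String × List (List String) × List String × Option Int × Option (List String)) :
    List Int × List String × List (List String) × List String :=
  match st with
  | (idx, tokens, groups, phrases, _, none) => (idx, tokens, groups, phrases)
  | (idx, tokens, groups, phrases, _, some m) => (idx, tokens, groups, phrases ++ [PySem.Str.join " " m])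

def get_subsequences_py_alt (diff : List String) (sign : String) :
    List Int × List String × List (List String) × List String :=
  match pvOp? sign with
  | none => ([], [], [], [])    -- Python raises KeyError here; excluded by Pre_
  | some op =>
    pvBFin ((PySem.List.enumerate diff).foldl (pvStepB op) ([], [], [], [], none, none))

-- ===== PRECONDITION & SPEC =====
-- Pre_ excludes exactly the inputs where Python A raises: an unknown sign (KeyError on the
-- literal dict) and an empty string in diff (IndexError on o[0]).
def Pre_get_subsequences_py (diff : List String) (sign : String) : Prop :=
  (sign = "insertions" ∨ sign = "removals" ∨ sign = "unchanged") ∧ ∀ o ∈ diff, o ≠ ""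
instance (diff : List String) (sign : String) : Decidable (Pre_get_subsequences_py diff sign) := by
  unfold Pre_get_subsequences_py; infer_instance

def pvWitness_get_subsequences_py : List String × String :=
  (["+ a", "- b", "+ c,", "+ ,", "  d"], "insertions")

def Spec_get_subsequences_py (diff : List String) (sign : String) (out : List Int × List String × List (List String) × List String) : Prop := out = get_subsequences_py_alt diff sign
instance (diff : List String) (sign : String) (out : List Int × List String × List (List String) × List String) : Decidable (Spec_get_subsequences_py diff sign out) := by unfold Spec_get_subsequences_py; infer_instance

-- ===== CLAIM (what is proved, stated in full; the proofs are below) =====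
def Claim_equal_get_subsequences_py : Prop := ∀ (diff : List String) (sign : String), Dom_get_subsequences_py diff sign → Pre_get_subsequences_py diff sign → Spec_get_subsequences_py diff sign (get_subsequences_py diff sign)

-- ===== LEMMAS AND PROOFS =====

-- the filter both loops implement, the token extraction, and the run decomposition
def pvPred (op : Char) (p : Int × String) : Bool := PySem.Str.pyGet? p.2 0 == some op

def pvExt (p : Int × String) : Int × String := (p.1, PySem.Str.slice p.2 (some 2) none)

def pvRunsFrom (i : Int) (g : List String) : List (Int × String) → List (List String)
  | [] => [g]
  | (j, t) :: rest => if j = i + 1 then pvRunsFrom j (g ++ [t]) rest else g :: pvRunsFrom j [t] rest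

def pvPhrase (g : List String) : String := PySem.Str.join " " (pvJoinPunct g)

-- pvBodyB with the token already extracted
def pvBody' (st : List Int × List String × List (List String) × List String × Option Int × Option (List String))
    (q : Int × String) :
    List Int × List String × List (List String) × List String × Option Int × Option (List String) :=
  let (idx, tokens, groups, phrases, prevI, merged) := st
  let idx := idx ++ [q.1]
  let tokens := tokens ++ [q.2]
  match prevI, merged with
  | some j, some m =>
    if q.1 = j + 1 then
      (idx, tokens, pvAppendLast groups q.2, phrases,
       some q.1, some (if pvIsPunctTok q.2 then pvGlueLast m q.2 else m ++ [q.2]))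
    else
      (idx, tokens, groups ++ [[q.2]], phrases ++ [PySem.Str.join " " m], some q.1, some [q.2])
  | _, _ => (idx, tokens, groups ++ [[q.2]], phrases, some q.1, some [q.2])


theorem pvGlueLast_snoc : ∀ (l : List String) (c t : String),
    pvGlueLast (l ++ [c]) t = l ++ [c ++ t]
  | [], _, _ => rfl
  | [_], _, _ => rfl
  | x :: y :: ys, c, t => by
    simpa [pvGlueLast] using congrArg (List.cons x) (pvGlueLast_snoc (y :: ys) c t)

theorem pvAppendLast_snoc : ∀ (gs : List (List String)) (g : List String) (t : String),
    pvAppendLast (gs ++ [g]) t = gs ++ [g ++ [t]]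
  | [], _, _ => rfl
  | [_], _, _ => rfl
  | x :: y :: ys, g, t => by
    simpa [pvAppendLast] using congrArg (List.cons x) (pvAppendLast_snoc (y :: ys) g t)

theorem pvJoinPunct_snoc (h : String) (t : List String) (x : String) :
    pvJoinPunct ((h :: t) ++ [x]) =
      if pvIsPunctTok x then pvGlueLast (pvJoinPunct (h :: t)) x
      else pvJoinPunct (h :: t) ++ [x] := by
  simp only [List.cons_append, pvJoinPunct, List.foldl_append, List.foldl_cons, List.foldl_nil]
  by_cases hp : pvIsPunctTok x
  · simp [hp, pvGlueLast_snoc]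
  · simp [hp]

-- A's first loop is filter + two maps
theorem pvFoldA (op : Char) (e : List (Int × String)) (idx : List Int) (toks : List String) :
    e.foldl (fun (st : List Int × List String) p =>
        if PySem.Str.pyGet? p.2 0 = some op then
          (st.1 ++ [p.1], st.2 ++ [PySem.Str.slice p.2 (some 2) none])
        else st) (idx, toks)
      = (idx ++ (e.filter (pvPred op)).map (·.1),
         toks ++ (e.filter (pvPred op)).map (fun p => PySem.Str.slice p.2 (some 2) none)) := by
  induction e generalizing idx toks with
  | nil => simp
  | cons p rest ih =>
    rw [List.foldl_cons, List.filter_cons]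
    by_cases h : PySem.Str.pyGet? p.2 0 = some op
    · have hp : pvPred op p = true := by unfold pvPred; rw [h]; simp
      rw [if_pos h, if_pos hp, ih]
      simp
    · have hp : pvPred op p = false := by
        unfold pvPred; rw [beq_eq_false_iff_ne]; exact h
      rw [if_neg h]
      simp only [hp, Bool.false_eq_true, if_false]
      exact ih idx toks

-- B's loop skips exactly the elements the filter drops
theorem pvFoldB_filter (op : Char) (e : List (Int × String)) st :
    e.foldl (pvStepB op) st = (e.filter (pvPred op)).foldl pvBodyB st := by
  induction e generalizing st with
  | nil => rfl
  | cons p rest ih =>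
    rw [List.foldl_cons, List.filter_cons, pvStepB]
    by_cases h : PySem.Str.pyGet? p.2 0 = some op
    · have hp : pvPred op p = true := by unfold pvPred; rw [h]; simp
      rw [if_neg (not_not_intro h), if_pos hp, List.foldl_cons, ih]
    · have hp : pvPred op p = false := by
        unfold pvPred; rw [beq_eq_false_iff_ne]; exact h
      rw [if_pos h]
      simp only [hp, Bool.false_eq_true, if_false]
      exact ih st

-- zip(enumerate(idx), tokens) over the split pair is an embedding of enumerate of the pair list
theorem pvZipEnum (m : List (Int × String)) (s : Int) :
    (PySem.List.enumerate (m.map (·.1)) s).zip (m.map (·.2))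
      = (PySem.List.enumerate m s).map (fun q => ((q.1, q.2.1), q.2.2)) := by
  induction m generalizing s with
  | nil => rfl
  | cons q rest ih => simp [PySem.List.enumerate_cons, ih]

-- groupby on the arithmetic key pos - idx splits at non-consecutive indices
theorem pvGbyRuns (m : List (Int × String)) (p i : Int) (g : List String) (gs : List (List String)) :
    pvGbyFin (((PySem.List.enumerate m (p + 1)).map (fun q => ((q.1, q.2.1), q.2.2))).foldl
        pvGbyStep (some (p - i), g, gs))
      = gs ++ pvRunsFrom i g m := by
  induction m generalizing p i g gs with
  | nil => simp [PySem.List.enumerate_nil, pvGbyFin, pvRunsFrom]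
  | cons q rest ih =>
    obtain ⟨j, t⟩ := q
    simp only [PySem.List.enumerate_cons, List.map_cons, List.foldl_cons, pvGbyStep, pvRunsFrom]
    by_cases hj : j = i + 1
    · have hk : p + 1 - j = p - i := by omega
      rw [if_pos (by omega)]
      have h2 : p - i = (p + 1) - j := by omega
      rw [h2, ih (p + 1) j (g ++ [t]) gs, if_pos hj]
    · rw [if_neg (by omega)]
      rw [ih (p + 1) j [t] (gs ++ [g]), if_neg hj]
      simp

-- B's combined pass computes the same four components
theorem pvBInv (m : List (Int × String)) (i : Int) (g : List String) (hg : g ≠ [])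
    (gs : List (List String)) (idx : List Int) (toks phs : List String) :
    pvBFin (m.foldl pvBody' (idx, toks, gs ++ [g], phs, some i, some (pvJoinPunct g)))
      = (idx ++ m.map (·.1), toks ++ m.map (·.2), gs ++ pvRunsFrom i g m,
         phs ++ (pvRunsFrom i g m).map pvPhrase) := by
  induction m generalizing i g gs idx toks phs with
  | nil => simp [pvBFin, pvRunsFrom, pvPhrase]
  | cons q rest ih =>
    obtain ⟨j, t⟩ := q
    obtain ⟨h0, g0, rfl⟩ := List.exists_cons_of_ne_nil hg
    simp only [List.foldl_cons, pvBody', pvRunsFrom]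
    by_cases hj : j = i + 1
    · rw [if_pos hj, pvAppendLast_snoc, ← pvJoinPunct_snoc]
      rw [ih j ((h0 :: g0) ++ [t]) (by simp) gs (idx ++ [j]) (toks ++ [t]) phs]
      simp [if_pos hj]
    · rw [if_neg hj]
      rw [show (some [t] : Option (List String)) = some (pvJoinPunct [t]) from rfl]
      rw [ih j [t] (by simp) (gs ++ [h0 :: g0]) (idx ++ [j]) (toks ++ [t])
        (phs ++ [PySem.Str.join " " (pvJoinPunct (h0 :: g0))])]
      simp [if_neg hj, pvPhrase]

-- both pipelines agree on the filtered (index, token) list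
theorem pvMain (m : List (Int × String)) :
    (m.map (·.1), m.map (·.2),
     pvGroupby ((PySem.List.enumerate (m.map (·.1))).zip (m.map (·.2))),
     (pvGroupby ((PySem.List.enumerate (m.map (·.1))).zip (m.map (·.2)))).map
        (fun l => PySem.Str.join " " (pvJoinPunct l)))
    = pvBFin (m.foldl pvBody' ([], [], [], [], none, none)) := by
  cases m with
  | nil => rfl
  | cons q rest =>
    obtain ⟨i0, t0⟩ := q
    rw [pvZipEnum]
    simp only [PySem.List.enumerate_cons, List.map_cons, List.foldl_cons, pvGroupby]
    have h1 : pvGbyStep (none, [], []) ((0, i0), t0) = (some (0 - i0), [t0], []) := rfl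
    rw [h1, pvGbyRuns rest 0 i0 [t0] []]
    have h2 : pvBody' ([], [], [], [], none, none) (i0, t0)
        = ([i0], [t0], [] ++ [[t0]], [], some i0, some (pvJoinPunct [t0])) := rfl
    rw [h2, pvBInv rest i0 [t0] (by simp) [] [i0] [t0] []]
    simp [pvPhrase]

-- ===== VERDICT (by name: the statement is the Claim_ definition above) =====
theorem get_subsequences_py_spec : Claim_equal_get_subsequences_py := by
  intro diff sign _ _
  unfold Spec_get_subsequences_py
  show get_subsequences_py diff sign = get_subsequences_py_alt diff sign
  unfold get_subsequences_py get_subsequences_py_alt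
  cases hop : pvOp? sign with
  | none => rfl
  | some op =>
    simp only []
    rw [pvFoldA op (PySem.List.enumerate diff) [] [], pvFoldB_filter]
    have hfold : ((PySem.List.enumerate diff).filter (pvPred op)).foldl pvBodyB
          ([], [], [], [], none, none)
        = (((PySem.List.enumerate diff).filter (pvPred op)).map pvExt).foldl pvBody'
          ([], [], [], [], none, none) := by
      rw [List.foldl_map]
      rfl
    rw [hfold]
    have hm1 : (((PySem.List.enumerate diff).filter (pvPred op)).map pvExt).map (·.1)
        = ((PySem.List.enumerate diff).filter (pvPred op)).map (·.1) := by
      rw [List.map_map]; rfl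
    have hm2 : (((PySem.List.enumerate diff).filter (pvPred op)).map pvExt).map (·.2)
        = ((PySem.List.enumerate diff).filter (pvPred op)).map
            (fun p => PySem.Str.slice p.2 (some 2) none) := by
      rw [List.map_map]; rfl
    have := pvMain (((PySem.List.enumerate diff).filter (pvPred op)).map pvExt)
    rw [hm1, hm2] at this
    simp only [List.nil_append]
    exact this
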